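-- pv_equiv track=rewrite | github.com/ahendry18/PyNR | dependencies/general.py | inds_to_cellname
-- ===== SOURCE A (Python) =====
-- def inds_to_cellname(row, col):
--     """
--     Takes a pythonic index of row and column and returns the corresponding excel
--     cell name.
--     This function was taken from the mass-spec-python-tools XLSX class
--
--     **Parameters**
--
--     row: *integer*
--         The pythonic index for the row, an index of 0 being the first row.
--
--     col: *integer*
--         The pythonic index for the column, an index of 0 being the first column.
--
--
--     **Returns**
--
--     cell name: *string*
--         The excel-style cell name.
--
--
--     **Examples**
--
--     ::
--
--         >>> inds_to_cellname(55,14)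
--         'O56'
--         >>> inds_to_cellname(12,25)
--         'Z13'
--         >>> inds_to_cellname(18268,558)
--         'UM18269'
--
--
--     **Notes**
--
--     Based on http://stackoverflow.com/questions/23861680/convert-spreadsheet-number-to-column-letter
--     """
--     div = row + 1
--     string = ""
--     while div > 0:
--         module = (div - 1) % 26
--         string += chr(65 + module)
--         div = int((div - module) / 26)
--     return string[::-1] + str(col + 1)  # string order must be reversed to be accurate
-- ===== SOURCE B (Python) =====
-- def inds_to_cellname(row, col):
--     def letters(n):
--         # base-26 bijective numeration, built left-to-right (no reversal step)
--         if n <= 0: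
--             return ""
--         return letters((n - 1) // 26) + chr(65 + (n - 1) % 26)
--     return letters(row + 1) + str(col + 1)
-- ===== Notes on version B (the rewrite author's own statement) =====
-- stated objective: simpler
-- what changed: Replaces the iterative divide-append-then-reverse loop with a direct recursive bijective-base-26 formulation that builds the letter string left-to-right, so the reversal step and the float-division int((div-module)/26) disappear.
import Mathlib
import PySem

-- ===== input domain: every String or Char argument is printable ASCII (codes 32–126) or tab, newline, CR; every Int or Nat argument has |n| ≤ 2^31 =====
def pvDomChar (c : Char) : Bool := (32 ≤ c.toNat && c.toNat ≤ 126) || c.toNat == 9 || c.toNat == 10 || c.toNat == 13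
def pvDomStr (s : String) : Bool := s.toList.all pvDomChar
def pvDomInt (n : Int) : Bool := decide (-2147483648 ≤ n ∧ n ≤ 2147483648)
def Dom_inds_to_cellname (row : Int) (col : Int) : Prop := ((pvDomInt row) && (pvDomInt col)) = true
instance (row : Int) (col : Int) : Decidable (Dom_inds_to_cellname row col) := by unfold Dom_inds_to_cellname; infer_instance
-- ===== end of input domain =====

-- B replaces A's divide-append-then-reverse loop by a direct recursive base-26 helper that
-- builds the letter string left-to-right (objective: simpler). Return values proved equal.

-- termination/step lemma cited by pvLoopA's decreasing_by: A's next loop state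
-- int((div - module) / 26) equals B's recursion argument (div - 1) // 26 when div > 0
theorem pvNext_eq (d : Int) (hd : 0 < d) :
    PySem.Int.truncdiv (d - PySem.Int.mod (d - 1) 26) 26 = PySem.Int.floordiv (d - 1) 26 := by
  have hmod : PySem.Int.mod (d - 1) 26 = (d - 1) % 26 :=
    PySem.Int.mod_eq_emod_of_pos (by norm_num)
  have h2 : PySem.Int.floordiv (d - 1) 26 = (d - 1) / 26 :=
    PySem.Int.floordiv_eq_ediv_of_pos (by norm_num)
  have h1 : PySem.Int.truncdiv (d - PySem.Int.mod (d - 1) 26) 26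
      = (d - PySem.Int.mod (d - 1) 26) / 26 := by
    simp only [PySem.Int.truncdiv]
    exact Int.tdiv_eq_ediv_of_nonneg (by rw [hmod]; omega)
  rw [h1, h2, hmod]; omega

theorem pvFloordiv_toNat_lt (d : Int) (hd : 0 < d) :
    (PySem.Int.floordiv (d - 1) 26).toNat < d.toNat := by
  have h2 : PySem.Int.floordiv (d - 1) 26 = (d - 1) / 26 :=
    PySem.Int.floordiv_eq_ediv_of_pos (by norm_num)
  omega

-- ===== PORT A =====
-- the while loop: state is (div, string); the string is built as List Char (PYSEM.md: prove
-- string facts on the list side).  `int((div - module) / 26)` is PySem.Int.truncdiv, exact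
-- here since |operands| < 2^53 on Dom.
def pvLoopA (div : Int) (string : List Char) : List Char :=
  if h : div > 0 then
    let module := PySem.Int.mod (div - 1) 26
    pvLoopA (PySem.Int.truncdiv (div - module) 26) (string ++ [Char.ofNat (65 + module).toNat])
  else string
termination_by div.toNat
decreasing_by
  rw [pvNext_eq div h]
  exact pvFloordiv_toNat_lt div h

-- div = row + 1; string = ""; `string[::-1]` on a List Char is List.reverse;
-- `str(col + 1)` is PySem.Int.toStr
def inds_to_cellname (row : Int) (col : Int) : String :=
  String.ofList (pvLoopA (row + 1) []).reverse ++ PySem.Int.toStr (col + 1)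

-- ===== PORT B =====
-- Source B's letters(n): '' if n <= 0 else letters((n - 1) // 26) + chr(65 + (n - 1) % 26)
def pvLetters (n : Int) : List Char :=
  if h : n ≤ 0 then []
  else pvLetters (PySem.Int.floordiv (n - 1) 26) ++ [Char.ofNat (65 + PySem.Int.mod (n - 1) 26).toNat]
termination_by n.toNat
decreasing_by
  exact pvFloordiv_toNat_lt n (by omega)

def inds_to_cellname_alt (row : Int) (col : Int) : String :=
  String.ofList (pvLetters (row + 1)) ++ PySem.Int.toStr (col + 1)

-- ===== PRECONDITION & SPEC =====
def Spec_inds_to_cellname (row : Int) (col : Int) (out : String) : Prop := out = inds_to_cellname_alt row col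
instance (row : Int) (col : Int) (out : String) : Decidable (Spec_inds_to_cellname row col out) := by unfold Spec_inds_to_cellname; infer_instance

-- ===== CLAIM (what is proved, stated in full; the proofs are below) =====
def Claim_equal_inds_to_cellname : Prop := ∀ (row : Int) (col : Int), Dom_inds_to_cellname row col → Spec_inds_to_cellname row col (inds_to_cellname row col)

-- ===== LEMMAS AND PROOFS =====

-- A's loop only ever appends to its accumulator
theorem pvLoopA_acc (div : Int) : ∀ acc, pvLoopA div acc = acc ++ pvLoopA div [] := by
  induction div using pvLetters.induct with
  | case1 d hd =>
      intro acc
      conv_lhs => rw [pvLoopA]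
      conv_rhs => rw [pvLoopA]
      simp [not_lt.mpr hd]
  | case2 d hd ih =>
      intro acc
      have hd' : (0:Int) < d := by omega
      conv_lhs => rw [pvLoopA]
      conv_rhs => rw [pvLoopA]
      simp only [dif_pos (show d > 0 from hd')]
      rw [pvNext_eq d hd', ih, List.nil_append,
        ih [Char.ofNat (65 + PySem.Int.mod (d - 1) 26).toNat], List.append_assoc]

-- core equivalence: reversing A's loop output gives B's left-to-right recursion
theorem pvLoopA_reverse (n : Int) : (pvLoopA n []).reverse = pvLetters n := by
  induction n using pvLetters.induct with
  | case1 d hd =>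
      rw [pvLoopA, pvLetters]
      simp [hd, not_lt.mpr hd]
  | case2 d hd ih =>
      have hd' : (0:Int) < d := by omega
      rw [pvLoopA, pvLetters]
      simp only [dif_pos (show d > 0 from hd'), dif_neg hd]
      rw [pvNext_eq d hd', pvLoopA_acc, List.reverse_append, ih]
      simp

-- ===== VERDICT (by name: the statement is the Claim_ definition above) =====
theorem inds_to_cellname_spec : Claim_equal_inds_to_cellname := by
  intro row col _
  unfold Spec_inds_to_cellname inds_to_cellname inds_to_cellname_alt
  rw [pvLoopA_reverse]
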